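-- pv_equiv track=rewrite | github.com/lhh/jirate | trolly/cli.py | split_card_text
-- ===== SOURCE A (Python) =====
-- def split_card_text(text):
--     lines = text.split('\n')
--     name = lines[0]
--     desc = ''
--     if not len(name):
--         return (None, None)
--     lines.pop(0)
--     while len(lines) and lines[0] == '':
--         lines.pop(0)
--     if len(lines):
--         desc = '\n'.join(lines)
--     return (name, desc)
-- ===== SOURCE B (Python) =====
-- def split_card_text(text):
--     name, _, rest = text.partition('\n')
--     if not name:
--         return (None, None)
--     return (name, rest.lstrip('\n'))
-- ===== Notes on version B (the rewrite author's own statement) =====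
-- stated objective: simpler
-- what changed: Replaces split-into-list + pop(0) loop + rejoin with a single partition at the first newline and a left-strip of leading newlines of the remainder; no list of lines is built or traversed.
import Mathlib
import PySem

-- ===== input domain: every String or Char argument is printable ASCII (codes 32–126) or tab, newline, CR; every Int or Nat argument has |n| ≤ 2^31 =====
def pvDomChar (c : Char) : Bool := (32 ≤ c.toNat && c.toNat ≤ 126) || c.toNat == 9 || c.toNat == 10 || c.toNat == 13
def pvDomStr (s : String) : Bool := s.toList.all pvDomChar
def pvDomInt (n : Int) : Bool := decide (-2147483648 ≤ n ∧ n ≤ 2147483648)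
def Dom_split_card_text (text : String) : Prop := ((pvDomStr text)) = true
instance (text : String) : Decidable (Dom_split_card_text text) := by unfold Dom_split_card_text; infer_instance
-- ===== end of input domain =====

-- B replaces A's split-into-list + pop-loop + rejoin by a single partition at the
-- first newline plus lstrip('\n') of the remainder (objective: simpler).

-- ===== PORT A =====
def split_card_text (text : String) : Option String × Option String :=
  let lines := PySem.Chars.splitOn text.toList ['\n']     -- text.split('\n')
  let name := lines.headD []                              -- lines[0] (split is never empty)
  if name.length = 0 then (none, none)
  else
    let lines := lines.tail                               -- lines.pop(0)
    let lines := lines.dropWhile (· == ([] : List Char))  -- while len(lines) and lines[0] == '': lines.pop(0)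
    let desc := if lines.length ≠ 0 then PySem.Chars.join ['\n'] lines else []
    (some (String.mk name), some (String.mk desc))

-- ===== PORT B =====
-- partition('\n') ported by hand as takeWhile/dropWhile at the first '\n' (exact);
-- lstrip('\n') ported as dropWhile (· == '\n') (exact).
def split_card_text_alt (text : String) : Option String × Option String :=
  let cs := text.toList
  let name := cs.takeWhile (· != '\n')
  let rest := (cs.dropWhile (· != '\n')).drop 1
  if name = [] then (none, none)
  else (some (String.mk name), some (String.mk (rest.dropWhile (· == '\n'))))

-- ===== PRECONDITION & SPEC =====
def Spec_split_card_text (text : String) (out : Option String × Option String) : Prop := out = split_card_text_alt text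
instance (text : String) (out : Option String × Option String) : Decidable (Spec_split_card_text text out) := by unfold Spec_split_card_text; infer_instance

-- ===== CLAIM (what is proved, stated in full; the proofs are below) =====
def Claim_equal_split_card_text : Prop := ∀ (text : String), Dom_split_card_text text → Spec_split_card_text text (split_card_text text)

-- ===== LEMMAS AND PROOFS =====

-- structural model of splitOn with single-char separator '\n'
def nlSplit (pre : List Char) : List Char → List (List Char)
  | [] => [pre]
  | c :: r => if c = '\n' then pre :: nlSplit [] r else nlSplit (pre ++ [c]) r

theorem nlSplit_go (fuel : Nat) : ∀ (l cur : List Char) (acc : List (List Char)),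
    l.length ≤ fuel →
    PySem.Chars.splitOn.go ['\n'] fuel l cur acc = acc.reverse ++ nlSplit cur.reverse l := by
  induction fuel with
  | zero =>
    intro l cur acc h
    have : l = [] := List.eq_nil_of_length_eq_zero (Nat.le_zero.mp h)
    subst this
    simp [PySem.Chars.splitOn.go, nlSplit]
  | succ n ih =>
    intro l cur acc h
    cases l with
    | nil => simp [PySem.Chars.splitOn.go, nlSplit]
    | cons c r =>
      simp only [PySem.Chars.splitOn.go]
      by_cases hc : c = '\n'
      · subst hc
        have hp : List.isPrefixOf ['\n'] ('\n' :: r) = true := by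
          simp [List.isPrefixOf]
        rw [if_pos hp]
        have := ih r [] (cur.reverse :: acc) (by simpa using Nat.le_of_succ_le_succ h)
        simpa [nlSplit] using this
      · have hp : List.isPrefixOf ['\n'] (c :: r) = false := by
          have hb : ('\n' == c) = false := beq_eq_false_iff_ne.mpr fun h => hc h.symm
          simp [List.isPrefixOf, hb]
        rw [hp]
        simp only [Bool.false_eq_true, if_false]
        have := ih r (c :: cur) acc (by simpa using Nat.le_of_succ_le_succ h)
        simpa [nlSplit, hc] using this

theorem splitOn_nl (cs : List Char) : PySem.Chars.splitOn cs ['\n'] = nlSplit [] cs := by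
  have := nlSplit_go (cs.length + 1) cs [] [] (Nat.le_succ _)
  simpa [PySem.Chars.splitOn] using this

-- shape of nlSplit: head and tail in closed form
theorem nlSplit_eq (cs : List Char) : ∀ pre : List Char,
    nlSplit pre cs = (pre ++ cs.takeWhile (· != '\n')) ::
      (match cs.dropWhile (· != '\n') with
       | [] => []
       | _ :: r => nlSplit [] r) := by
  induction cs with
  | nil => intro pre; simp [nlSplit]
  | cons c r ih =>
    intro pre
    by_cases hc : c = '\n'
    · subst hc
      rw [List.takeWhile_cons_of_neg (by simp), List.dropWhile_cons_of_neg (by simp)]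
      simp [nlSplit]
    · have hcb : (c != '\n') = true := by simp [hc]
      simp only [List.takeWhile_cons, List.dropWhile_cons, hcb, if_true]
      simp [nlSplit, hc, ih (pre ++ [c])]

theorem nlSplit_ne_nil (pre cs : List Char) : nlSplit pre cs ≠ [] := by
  rw [nlSplit_eq]; simp

theorem join_nlSplit (cs : List Char) : ∀ pre : List Char,
    PySem.Chars.join ['\n'] (nlSplit pre cs) = pre ++ cs := by
  induction cs with
  | nil => intro pre; simp [nlSplit, PySem.Chars.join, List.intercalate]
  | cons c r ih =>
    intro pre
    by_cases hc : c = '\n'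
    · subst hc
      show PySem.Chars.join ['\n'] (pre :: nlSplit [] r) = _
      obtain ⟨x, t, hx⟩ : ∃ x t, nlSplit ([] : List Char) r = x :: t := by
        cases h : nlSplit ([] : List Char) r with
        | nil => exact absurd h (nlSplit_ne_nil _ _)
        | cons x t => exact ⟨x, t, rfl⟩
      rw [hx]
      have := ih ([] : List Char)
      rw [hx] at this
      simp [PySem.Chars.join, List.intercalate] at this ⊢
      simp [this]
    · simp only [nlSplit, if_neg hc]
      rw [ih (pre ++ [c])]
      simp

-- the tail pipeline of A (drop empty lines, rejoin) equals B's lstrip('\n') of the rest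
theorem tail_pipeline (r : List Char) :
    (if ((nlSplit [] r).dropWhile (· == ([] : List Char))).length ≠ 0
     then PySem.Chars.join ['\n'] ((nlSplit [] r).dropWhile (· == ([] : List Char)))
     else []) = r.dropWhile (· == '\n') := by
  induction r with
  | nil => simp [nlSplit]
  | cons c r ih =>
    by_cases hc : c = '\n'
    · subst hc
      rw [show nlSplit ([] : List Char) ('\n' :: r) = [] :: nlSplit [] r by simp [nlSplit]]
      rw [List.dropWhile_cons_of_pos (by simp), List.dropWhile_cons_of_pos (by simp)]
      exact ih
    · have hcb : (c != '\n') = true := by simp [hc]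
      have hhead : nlSplit ([] : List Char) (c :: r)
          = (c :: r.takeWhile (· != '\n')) ::
            (match r.dropWhile (· != '\n') with | [] => [] | _ :: r' => nlSplit [] r') := by
        rw [nlSplit_eq]
        simp only [List.takeWhile_cons, List.dropWhile_cons, hcb, if_true]
        simp
      rw [hhead]
      rw [List.dropWhile_cons_of_neg (by simp)]
      have hj : PySem.Chars.join ['\n'] ((c :: r.takeWhile (· != '\n')) ::
            (match r.dropWhile (· != '\n') with | [] => [] | _ :: r' => nlSplit [] r'))
          = c :: r := by
        have := join_nlSplit (c :: r) ([] : List Char)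
        rw [hhead] at this
        simpa using this
      rw [List.dropWhile_cons_of_neg (by simp [hc])]
      simpa [hj] using hj

-- ===== VERDICT (by name: the statement is the Claim_ definition above) =====
theorem split_card_text_spec : Claim_equal_split_card_text := by
  intro text _
  show split_card_text text = split_card_text_alt text
  unfold split_card_text split_card_text_alt
  rw [splitOn_nl]
  rw [nlSplit_eq text.toList ([] : List Char)]
  by_cases hname : text.toList.takeWhile (· != '\n') = []
  · simp [hname]
  · simp only [List.nil_append, List.headD_cons, List.tail_cons]
    rw [if_neg (by simpa [List.length_eq_zero_iff] using hname), if_neg hname]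
    refine Prod.ext rfl ?_
    cases hdrop : text.toList.dropWhile (· != '\n') with
    | nil =>
      have := tail_pipeline ([] : List Char)
      simp [nlSplit] at this ⊢
    | cons x r =>
      have := tail_pipeline r
      simp only [List.drop_one, List.tail_cons]
      rw [this.symm]
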